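-- pv_equiv track=rewrite | github.com/daniyalbhaila/DineoutVancouverHalal | scripts/scrape_dineout.py | find_menu_price
-- ===== SOURCE A (Python) =====
-- def find_menu_price(menu_info):
--     for key, val in menu_info.items():
--         if "price for this menu" in key.lower():
--             return val
--     for key, val in menu_info.items():
--         if "menu price" in key.lower():
--             return val
--     return ""
-- ===== SOURCE B (Python) =====
-- def find_menu_price(menu_info):
--     fallback = None
--     for key, val in menu_info.items():
--         k = key.lower()
--         if "price for this menu" in k:
--             return val
--         if fallback is None and "menu price" in k:
--             fallback = val
--     return fallback if fallback is not None else ""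
-- ===== Notes on version B (the rewrite author's own statement) =====
-- stated objective: simpler
-- what changed: Replaces A's two sequential scans of the dict with a single pass that returns immediately on the high-priority match and keeps the first low-priority match as a deferred fallback.
import Mathlib
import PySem

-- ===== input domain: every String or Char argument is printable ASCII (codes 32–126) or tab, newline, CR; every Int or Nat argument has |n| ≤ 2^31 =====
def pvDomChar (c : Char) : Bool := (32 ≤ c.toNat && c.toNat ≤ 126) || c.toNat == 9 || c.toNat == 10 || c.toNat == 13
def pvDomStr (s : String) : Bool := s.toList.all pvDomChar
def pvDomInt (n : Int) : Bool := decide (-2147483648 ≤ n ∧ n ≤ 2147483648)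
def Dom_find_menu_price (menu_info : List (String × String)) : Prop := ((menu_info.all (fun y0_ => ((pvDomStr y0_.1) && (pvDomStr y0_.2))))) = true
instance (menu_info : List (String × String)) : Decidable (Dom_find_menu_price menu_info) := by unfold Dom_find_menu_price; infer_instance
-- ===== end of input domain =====

-- B: one pass with a deferred fallback instead of A's two sequential scans (simpler decomposition, same O(n) cost).
-- ===== PORT A =====
-- first loop of A: return val on the first key containing "price for this menu"
def pvScanHigh : List (String × String) → Option String
  | [] => none
  | (k, v) :: rest =>
      if PySem.Str.isIn "price for this menu" (PySem.Str.lower k) then some v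
      else pvScanHigh rest

-- second loop of A: return val on the first key containing "menu price"
def pvScanLow : List (String × String) → Option String
  | [] => none
  | (k, v) :: rest =>
      if PySem.Str.isIn "menu price" (PySem.Str.lower k) then some v
      else pvScanLow rest

def find_menu_price (menu_info : List (String × String)) : String :=
  match pvScanHigh menu_info with
  | some v => v
  | none =>
    match pvScanLow menu_info with
    | some v => v
    | none => ""

-- ===== PORT B =====
-- B's single loop, carrying the fallback accumulator
def pvOnePass : List (String × String) → Option String → String
  | [], fb => fb.getD ""
  | (k, v) :: rest, fb =>
      let kl := PySem.Str.lower k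
      if PySem.Str.isIn "price for this menu" kl then v
      else if fb.isNone && PySem.Str.isIn "menu price" kl then pvOnePass rest (some v)
      else pvOnePass rest fb

def find_menu_price_alt (menu_info : List (String × String)) : String :=
  pvOnePass menu_info none

-- ===== PRECONDITION & SPEC =====
def Spec_find_menu_price (menu_info : List (String × String)) (out : String) : Prop := out = find_menu_price_alt menu_info
instance (menu_info : List (String × String)) (out : String) : Decidable (Spec_find_menu_price menu_info out) := by unfold Spec_find_menu_price; infer_instance

-- ===== CLAIM (what is proved, stated in full; the proofs are below) =====
def Claim_equal_find_menu_price : Prop := ∀ (menu_info : List (String × String)), Dom_find_menu_price menu_info → Spec_find_menu_price menu_info (find_menu_price menu_info)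

-- ===== LEMMAS AND PROOFS =====

-- ===== VERDICT (by name: the statement is the Claim_ definition above) =====
-- B's loop invariant: with fallback fb, the one-pass loop returns the first high-priority
-- match if any, else fb if set, else the first low-priority match, else "".
theorem pvOnePass_eq (l : List (String × String)) : ∀ fb : Option String,
    pvOnePass l fb =
      match pvScanHigh l with
      | some v => v
      | none =>
        match fb with
        | some f => f
        | none => match pvScanLow l with | some v => v | none => "" := by
  induction l with
  | nil => intro fb; cases fb <;> rfl
  | cons p rest ih =>
    intro fb
    obtain ⟨k, v⟩ := p
    simp only [pvOnePass, pvScanHigh, pvScanLow]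
    by_cases h1 : PySem.Str.isIn "price for this menu" (PySem.Str.lower k) = true
    · simp only [h1, if_true]
    · simp only [h1, if_false, Bool.false_eq_true]
      cases fb with
      | some f =>
        simp only [Option.isNone_some, Bool.false_and, if_false, ih, Bool.false_eq_true]
      | none =>
        by_cases h2 : PySem.Str.isIn "menu price" (PySem.Str.lower k) = true
        · simp only [Option.isNone_none, Bool.true_and, h2, if_true, ih]
        · simp only [Option.isNone_none, Bool.true_and, h2, if_false, ih,
            Bool.false_eq_true]

theorem find_menu_price_spec : Claim_equal_find_menu_price := by
  intro l _
  unfold Spec_find_menu_price find_menu_price find_menu_price_alt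
  rw [pvOnePass_eq]
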